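-- pv_equiv track=rewrite | github.com/gonepallykarthik/Data-Structures-and-algorithms | python/config.py | solve
-- ===== SOURCE A (Python) =====
-- def solve(A,B,C,D):
--     if len(A) == 0:
--         return 0
--
--     prefixMax1 = [0] * len(A)
--     for i in range(len(A)):
--         if i == 0:
--             prefixMax1[i] = A[i] * B
--         else:
--             prefixMax1[i] = max(prefixMax1[i-1], A[i]*B)
--
--     prefixMax2 = [0] * len(A)
--     for i in range(len(A)):
--         if i == 0:
--             prefixMax2[i] = A[i] * C + prefixMax1[i]
--         else:
--             prefixMax2[i] = max(prefixMax2[i-1], A[i]*C+prefixMax1[i])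
--
--     prefixMax3 = [0] * len(A)
--     for i in range(len(A)):
--         prefixMax3[i] = A[i] * D + prefixMax2[i]
--
--     return max(prefixMax3)
-- ===== SOURCE B (Python) =====
-- def solve(A, B, C, D):
--     # Single forward pass keeping three running maxima instead of three prefix arrays.
--     if len(A) == 0:
--         return 0
--     best1 = A[0] * B
--     best2 = A[0] * C + best1
--     best3 = A[0] * D + best2
--     for x in A[1:]:
--         best1 = max(best1, x * B)
--         best2 = max(best2, x * C + best1)
--         best3 = max(best3, x * D + best2)
--     return best3
-- ===== Notes on version B (the rewrite author's own statement) =====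
-- stated objective: simpler
-- what changed: Replaces three full prefix arrays and four traversals (three build loops plus the final max) with one forward loop over A maintaining three scalar running maxima; O(1) extra space instead of O(n).
import Mathlib
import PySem

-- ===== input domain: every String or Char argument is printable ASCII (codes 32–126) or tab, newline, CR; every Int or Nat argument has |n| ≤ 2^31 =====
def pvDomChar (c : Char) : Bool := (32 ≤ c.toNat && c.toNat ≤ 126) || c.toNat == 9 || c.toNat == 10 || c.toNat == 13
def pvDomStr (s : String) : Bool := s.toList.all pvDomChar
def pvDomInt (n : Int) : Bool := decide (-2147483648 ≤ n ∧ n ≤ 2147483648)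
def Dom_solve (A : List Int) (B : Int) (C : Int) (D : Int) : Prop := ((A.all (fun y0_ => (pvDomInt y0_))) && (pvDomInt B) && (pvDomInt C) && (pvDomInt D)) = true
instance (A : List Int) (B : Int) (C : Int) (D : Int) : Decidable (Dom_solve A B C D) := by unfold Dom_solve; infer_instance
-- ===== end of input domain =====

-- B replaces A's three prefix arrays (and four traversals) by one forward loop
-- over three scalar running maxima; objective: simpler (O(1) extra space).

-- ===== PORT A =====
-- loop 1: prefixMax1[i] = A[i]*B at i=0, else max(prefixMax1[i-1], A[i]*B);
-- carried value `prev` is prefixMax1[i-1]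
def pvBuild1 (B prev : Int) : List Int → List Int
  | [] => []
  | x :: xs => (max prev (x * B)) :: pvBuild1 B (max prev (x * B)) xs

-- loop 2 over pairs (A[i], prefixMax1[i]); `prev` is prefixMax2[i-1]
def pvBuild2 (C prev : Int) : List (Int × Int) → List Int
  | [] => []
  | (x, p) :: xs => (max prev (x * C + p)) :: pvBuild2 C (max prev (x * C + p)) xs

def solve (A : List Int) (B : Int) (C : Int) (D : Int) : Int :=
  match A with
  | [] => 0
  | a :: rest =>
    -- prefixMax1: i = 0 branch gives a*B, then the loop with prev
    let p1 : List Int := a * B :: pvBuild1 B (a * B) rest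
    -- prefixMax2: i = 0 branch gives a*C + p1[0], then the loop over (A[i],p1[i])
    let p2 : List Int := (a * C + a * B) :: pvBuild2 C (a * C + a * B) (rest.zip p1.tail)
    -- prefixMax3[i] = A[i]*D + prefixMax2[i]
    let p3 : List Int := (A.zip p2).map (fun xp => xp.1 * D + xp.2)
    -- return max(prefixMax3)
    match PySem.List.max? p3 (fun y => y) with
    | some m => m
    | none => 0

-- ===== PORT B =====
-- one step of the single loop: update best1, best2, best3 in order
def pvStep (B C D : Int) (s : Int × Int × Int) (x : Int) : Int × Int × Int :=
  let b1 := max s.1 (x * B)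
  let b2 := max s.2.1 (x * C + b1)
  let b3 := max s.2.2 (x * D + b2)
  (b1, b2, b3)

def solve_alt (A : List Int) (B : Int) (C : Int) (D : Int) : Int :=
  match A with
  | [] => 0
  | a :: rest =>
    (rest.foldl (pvStep B C D) (a * B, a * C + a * B, a * D + (a * C + a * B))).2.2

-- ===== PRECONDITION & SPEC =====
def Spec_solve (A : List Int) (B : Int) (C : Int) (D : Int) (out : Int) : Prop := out = solve_alt A B C D
instance (A : List Int) (B : Int) (C : Int) (D : Int) (out : Int) : Decidable (Spec_solve A B C D out) := by unfold Spec_solve; infer_instance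

-- ===== CLAIM (what is proved, stated in full; the proofs are below) =====
def Claim_equal_solve : Prop := ∀ (A : List Int) (B : Int) (C : Int) (D : Int), Dom_solve A B C D → Spec_solve A B C D (solve A B C D)

-- ===== LEMMAS AND PROOFS =====

-- invariant tying B's scalar fold to A's three chained prefix lists
theorem pv_key (Bc C D : Int) : ∀ (rest : List Int) (b1 b2 b3 : Int),
    (rest.foldl (pvStep Bc C D) (b1, b2, b3)).2.2 =
      List.foldl max b3
        ((rest.zip (pvBuild2 C b2 (rest.zip (pvBuild1 Bc b1 rest)))).map
          (fun xp => xp.1 * D + xp.2)) := by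
  intro rest
  induction rest with
  | nil => intro b1 b2 b3; simp
  | cons x xs ih =>
    intro b1 b2 b3
    simp only [pvBuild1, List.zip_cons_cons, pvBuild2, List.map_cons, List.foldl_cons, pvStep]
    exact ih (max b1 (x * Bc)) (max b2 (x * C + max b1 (x * Bc)))
      (max b3 (x * D + max b2 (x * C + max b1 (x * Bc))))

-- ===== VERDICT (by name: the statement is the Claim_ definition above) =====
theorem solve_spec : Claim_equal_solve := by
  intro A B C D _
  unfold Spec_solve
  match A with
  | [] => rfl
  | a :: rest =>
    simp only [solve, solve_alt, List.tail_cons, List.zip_cons_cons, List.map_cons,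
      PySem.List.max?_id_cons]
    exact (pv_key B C D rest (a * B) (a * C + a * B) (a * D + (a * C + a * B))).symm
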